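-- pv_equiv track=rewrite | github.com/AdamZhouSE/pythonHomework | Code/CodeRecords/2925/60643/297163.py | solution
-- ===== SOURCE A (Python) =====
-- def solution(a:list,b:list):
--     getIn=[]
--     overtake=[False]*len(a)#记录该车有没有超车 （不是被超车）
--     cnt=0
--     for car in a:
--         if car not in getIn:
--             getIn.append(car)
--         p=b.index(car)
--         for i in range(p):
--             if b[i] not in getIn and not overtake[i]:
--                 cnt+=1
--                 overtake[i]=True
--     return cnt
-- ===== SOURCE B (Python) =====
-- def solution(a: list, b: list):
--     # One pass with first-occurrence index maps and prefix maxima instead of A's nested rescans.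
--     n = len(a)
--     fa = {}
--     for t, x in enumerate(a):
--         if x not in fa:
--             fa[x] = t
--     fb = {}
--     for j, x in enumerate(b):
--         if x not in fb:
--             fb[x] = j
--     pref = [-1]
--     m = -1
--     for x in a:
--         m = max(m, fb.get(x, -1))
--         pref.append(m)
--     cnt = 0
--     for i, x in enumerate(b):
--         k = fa.get(x, n)
--         if pref[k] > i:
--             cnt += 1
--     return cnt
-- ===== Notes on version B (the rewrite author's own statement) =====
-- stated objective: alternative
-- what changed: A rescans a prefix of b inside a doubly nested loop (membership tests against the growing getIn list and b.index per car); B instead builds first-occurrence index maps for a and b once, takes prefix maxima of the exit indices along a, and decides each position of b in a single counting pass.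
import Mathlib
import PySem

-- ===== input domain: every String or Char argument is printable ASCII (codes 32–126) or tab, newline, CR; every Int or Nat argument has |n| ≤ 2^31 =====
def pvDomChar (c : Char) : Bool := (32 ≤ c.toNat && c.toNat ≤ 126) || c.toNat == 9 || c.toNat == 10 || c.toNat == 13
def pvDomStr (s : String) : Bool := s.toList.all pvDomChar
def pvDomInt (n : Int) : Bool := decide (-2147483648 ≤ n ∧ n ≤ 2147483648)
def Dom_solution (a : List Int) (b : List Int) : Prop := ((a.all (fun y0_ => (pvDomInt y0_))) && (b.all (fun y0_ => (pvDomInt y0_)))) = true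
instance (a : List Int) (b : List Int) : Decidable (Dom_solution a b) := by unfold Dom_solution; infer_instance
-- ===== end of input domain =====

-- B replaces A's nested rescans by a different algorithm: first-occurrence index maps and prefix maxima, one counting pass over b.


-- ===== PORT A =====
-- literal transliteration of A: getIn list with dedup-append, overtake flag list, nested loop over range(b.index(car)).
-- b.index(car) is ported with PySem.List.index?; Pre_ guarantees it is `some` (Python raises ValueError otherwise), so the
-- `.getD 0` completion is never reached inside Pre_. overtake[i] is read with getD and written with List.set (in range
-- under Pre_; Python raises IndexError exactly where Pre_'s second clause fails).
def solution (a : List Int) (b : List Int) : Int :=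
  let res := a.foldl (fun (st : List Int × List Bool × Int) car =>
    let getIn := if st.1.contains car then st.1 else st.1 ++ [car]
    let p := (PySem.List.index? b car).getD 0
    let inner := (List.range p).foldl (fun (s : List Bool × Int) i =>
        if !getIn.contains (b.getD i 0) && !(s.1.getD i false) then (s.1.set i true, s.2 + 1) else s)
      (st.2.1, st.2.2)
    (getIn, inner.1, inner.2)) ([], List.replicate a.length false, 0)
  res.2.2

-- ===== PORT B =====
-- B: first-occurrence index dicts fa/fb, prefix maxima of fb over a, one counting pass over enumerate(b).
def solution_alt (a : List Int) (b : List Int) : Int :=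
  let n : Int := (a.length : Int)
  let fa := (PySem.List.enumerate a).foldl
      (fun (d : PySem.Dict Int Int) p => if d.contains p.2 then d else d.insert p.2 p.1) PySem.Dict.empty
  let fb := (PySem.List.enumerate b).foldl
      (fun (d : PySem.Dict Int Int) p => if d.contains p.2 then d else d.insert p.2 p.1) PySem.Dict.empty
  let st := a.foldl (fun (st : List Int × Int) x =>
      let m := max st.2 (PySem.Dict.getD fb x (-1))
      (st.1 ++ [m], m)) ([(-1 : Int)], (-1 : Int))
  let pref := st.1
  (PySem.List.enumerate b).foldl (fun (cnt : Int) p =>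
      let k := PySem.Dict.getD fa p.2 n
      if p.1 < PySem.List.pyGetD pref k 0 then cnt + 1 else cnt) 0

-- ===== PRECONDITION & SPEC =====
-- helpers for Pre_: first-occurrence index of x in b (-1 if absent) and in a (len(a) if absent), both as Int
def pvFb (b : List Int) (x : Int) : Int := ((PySem.List.index? b x).map (Int.ofNat)).getD (-1)
def pvFa (a : List Int) (x : Int) : Int := ((PySem.List.index? a x).map (Int.ofNat)).getD (a.length : Int)
-- pvCond a b i: the overtake flag at position i of b gets set while A runs (some car a[t] exits after position i
-- while b[i] has not yet arrived at step t)
def pvCond (a b : List Int) (i : Nat) : Bool :=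
  decide (∃ t < a.length, (i : Int) < pvFb b (a.getD t 0) ∧ (t : Int) < pvFa a (b.getD i 0))
-- Pre_ = exactly the inputs on which the Python A returns: every car of a occurs in b (else b.index raises
-- ValueError), and no overtake flag would be set at a position ≥ len(a) (else overtake[i] raises IndexError).
def Pre_solution (a : List Int) (b : List Int) : Prop :=
  (∀ x ∈ a, x ∈ b) ∧ ∀ i ∈ List.range b.length, a.length ≤ i → pvCond a b i = false
instance (a : List Int) (b : List Int) : Decidable (Pre_solution a b) := by unfold Pre_solution; infer_instance
def pvWitness_solution : List Int × List Int := ([1, 2, 3], [2, 1, 3])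
def Spec_solution (a : List Int) (b : List Int) (out : Int) : Prop := out = solution_alt a b
instance (a : List Int) (b : List Int) (out : Int) : Decidable (Spec_solution a b out) := by unfold Spec_solution; infer_instance

-- ===== CLAIM (what is proved, stated in full; the proofs are below) =====
def Claim_equal_solution : Prop := ∀ (a : List Int) (b : List Int), Dom_solution a b → Pre_solution a b → Spec_solution a b (solution a b)

-- ===== LEMMAS AND PROOFS =====

-- A's loop body, named so the invariant can be stated about it (definitionally equal to the port's lambda)
def AStep (b : List Int) (st : List Int × List Bool × Int) (car : Int) : List Int × List Bool × Int :=
  let getIn := if st.1.contains car then st.1 else st.1 ++ [car]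
  let p := (PySem.List.index? b car).getD 0
  let inner := (List.range p).foldl (fun (s : List Bool × Int) i =>
      if !getIn.contains (b.getD i 0) && !(s.1.getD i false) then (s.1.set i true, s.2 + 1) else s)
    (st.2.1, st.2.2)
  (getIn, inner.1, inner.2)

theorem solution_eq_foldl (a b : List Int) :
    solution a b = (a.foldl (AStep b) ([], List.replicate a.length false, 0)).2.2 := by
  rfl

theorem pvFb_lt_len (b : List Int) (x : Int) : pvFb b x ≤ (b.length : Int) - 1 := by
  unfold pvFb
  rcases h : PySem.List.index? b x with _ | k
  · simp; omega
  · obtain ⟨hk, -, -⟩ := PySem.List.getElem_of_index?_eq_some h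
    simp; omega

theorem pvCond_false_of_ge (l b : List Int) (i : Nat) (hi : b.length ≤ i) :
    pvCond l b i = false := by
  unfold pvCond
  simp only [decide_eq_false_iff_not]
  rintro ⟨t, ht, h1, h2⟩
  have := pvFb_lt_len b (l.getD t 0)
  omega

theorem pvFa_append_gt (l : List Int) (car x : Int) (t : Nat) (ht : t < l.length) :
    ((t : Int) < pvFa (l ++ [car]) x) ↔ ((t : Int) < pvFa l x) := by
  unfold pvFa
  by_cases hx : x ∈ l
  · rw [PySem.List.index?_append_of_mem _ hx]
    rcases h : PySem.List.index? l x with _ | k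
    · simp at h; exact absurd hx h
    · simp
  · have h1 : PySem.List.index? l x = none := by
      rw [PySem.List.index?_eq_none_iff]; exact hx
    rw [h1]
    by_cases hc : x = car
    · subst hc
      rw [PySem.List.index?_append_singleton_self l x hx]
      simp
    · have h2 : PySem.List.index? (l ++ [car]) x = none := by
        rw [PySem.List.index?_eq_none_iff]
        simp [hx, Ne.symm, hc]
      rw [h2]
      simp; omega

theorem pvFa_append_self_gt (l : List Int) (car x : Int) :
    ((l.length : Int) < pvFa (l ++ [car]) x) ↔ x ∉ l ++ [car] := by
  unfold pvFa
  by_cases hx : x ∈ l ++ [car]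
  · rcases h : PySem.List.index? (l ++ [car]) x with _ | k
    · rw [PySem.List.index?_eq_none_iff] at h; exact absurd hx h
    · obtain ⟨hk, -, -⟩ := PySem.List.getElem_of_index?_eq_some h
      simp at hk
      simp [hx]
      omega
  · have h : PySem.List.index? (l ++ [car]) x = none := by
      rw [PySem.List.index?_eq_none_iff]; exact hx
    rw [h]
    simp [hx]

theorem getD_append_lt (l : List Int) (car : Int) (t : Nat) (ht : t < l.length) :
    (l ++ [car]).getD t 0 = l.getD t 0 := by
  simp [List.getD, List.getElem?_append_left ht]

theorem getD_append_self (l : List Int) (car : Int) :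
    (l ++ [car]).getD l.length 0 = car := by
  simp [List.getD]

theorem pvCond_append (l b : List Int) (car : Int) (i : Nat) :
    pvCond (l ++ [car]) b i
      = (pvCond l b i || decide ((i : Int) < pvFb b car ∧ b.getD i 0 ∉ l ++ [car])) := by
  unfold pvCond
  rw [Bool.eq_iff_iff]
  simp only [Bool.or_eq_true, decide_eq_true_eq, List.length_append, List.length_singleton]
  constructor
  · rintro ⟨t, ht, h1, h2⟩
    by_cases htl : t < l.length
    · left
      refine ⟨t, htl, ?_, ?_⟩
      · rwa [getD_append_lt l car t htl] at h1
      · rwa [pvFa_append_gt l car _ t htl] at h2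
    · have : t = l.length := by omega
      subst this
      right
      rw [getD_append_self] at h1
      exact ⟨h1, (pvFa_append_self_gt l car _).mp h2⟩
  · rintro (⟨t, ht, h1, h2⟩ | ⟨h1, h2⟩)
    · exact ⟨t, by omega, by rwa [getD_append_lt l car t ht],
        (pvFa_append_gt l car _ t ht).mpr h2⟩
    · exact ⟨l.length, by omega, by rwa [getD_append_self],
        (pvFa_append_self_gt l car _).mpr h2⟩

theorem countP_or (l : List Nat) (f g : Nat → Bool) :
    l.countP (fun x => f x || g x) = l.countP f + l.countP (fun x => g x && !f x) := by
  induction l with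
  | nil => simp
  | cons h t ih => by_cases hf : f h <;> by_cases hg : g h <;>
      simp [hf, hg, ih] <;> omega

theorem countP_range_restrict (n p : Nat) (hp : p ≤ n) (h : Nat → Bool) :
    (List.range n).countP (fun i => decide (i < p) && h i) = (List.range p).countP h := by
  have hn : n = p + (n - p) := by omega
  rw [hn, List.range_add, List.countP_append]
  have h1 : (List.range p).countP (fun i => decide (i < p) && h i) = (List.range p).countP h := by
    apply List.countP_congr
    intro i hi
    simp [List.mem_range] at hi
    simp [hi]
  have h2 : ((List.range (n - p)).map (p + ·)).countP (fun i => decide (i < p) && h i) = 0 := by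
    rw [List.countP_eq_zero]
    intro i hi
    simp [List.mem_map] at hi
    obtain ⟨j, _, rfl⟩ := hi
    simp
  omega

theorem set_getD (l : List Bool) (j i : Nat) :
    (l.set j true).getD i false = if i = j ∧ j < l.length then true else l.getD i false := by
  rcases eq_or_ne i j with rfl | hne
  · by_cases hj : i < l.length
    · simp [List.getD, hj]
    · rw [List.set_eq_of_length_le (by omega)]; simp [hj]
  · simp [List.getD, List.getElem?_set, hne.symm, hne]

theorem inner_spec (g b : List Int) (p : Nat) (ov : List Bool) (c : Int) :
    (((List.range p).foldl (fun (s : List Bool × Int) i =>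
        if !g.contains (b.getD i 0) && !(s.1.getD i false) then (s.1.set i true, s.2 + 1) else s)
      (ov, c)).1.length = ov.length)
    ∧ (∀ i : Nat, ((List.range p).foldl (fun (s : List Bool × Int) i =>
        if !g.contains (b.getD i 0) && !(s.1.getD i false) then (s.1.set i true, s.2 + 1) else s)
      (ov, c)).1.getD i false
        = (ov.getD i false || (decide (i < p) && decide (i < ov.length) && !g.contains (b.getD i 0))))
    ∧ (((List.range p).foldl (fun (s : List Bool × Int) i =>
        if !g.contains (b.getD i 0) && !(s.1.getD i false) then (s.1.set i true, s.2 + 1) else s)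
      (ov, c)).2
        = c + ((List.range p).countP (fun i => !g.contains (b.getD i 0) && !(ov.getD i false)) : Int)) := by
  induction p with
  | zero => simp
  | succ p ih =>
    obtain ⟨ihlen, ihget, ihcnt⟩ := ih
    rw [List.range_succ, List.foldl_append, List.countP_append]
    simp only [List.foldl_cons, List.foldl_nil, List.countP_cons, List.countP_nil]
    set r := ((List.range p).foldl (fun (s : List Bool × Int) i =>
        if !g.contains (b.getD i 0) && !(s.1.getD i false) then (s.1.set i true, s.2 + 1) else s)
      (ov, c)) with hr
    have hgp : r.1.getD p false = ov.getD p false := by rw [ihget p]; simp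
    have hdec : ∀ i : Nat, i ≠ p → (decide (i < p + 1) : Bool) = decide (i < p) := by
      intro i hne; rw [decide_eq_decide]; omega
    by_cases hcond : (!g.contains (b.getD p 0) && !(r.1.getD p false)) = true
    · rw [if_pos hcond]
      rw [hgp] at hcond
      have hc : g.contains (b.getD p 0) = false ∧ ov.getD p false = false := by
        simpa [Bool.and_eq_true, Bool.not_eq_true'] using hcond
      refine ⟨by simp [ihlen], ?_, ?_⟩
      · intro i
        rw [set_getD, ihget i, ihlen]
        rcases eq_or_ne i p with rfl | hne
        · rw [hc.1, hc.2]
          by_cases hil : i < ov.length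
          · rw [if_pos ⟨rfl, hil⟩]
            simp [hil]
          · rw [if_neg (by tauto)]
            simp [hil]
        · rw [if_neg (by tauto), hdec i hne]
      · rw [ihcnt, if_pos hcond]
        push_cast
        ring
    · rw [if_neg hcond]
      rw [hgp] at hcond
      refine ⟨ihlen, ?_, ?_⟩
      · intro i
        rw [ihget i]
        rcases eq_or_ne i p with rfl | hne
        · have hd : g.contains (b.getD i 0) = true ∨ ov.getD i false = true := by
            rcases Bool.eq_false_or_eq_true (g.contains (b.getD i 0)) with h1 | h1
            · exact Or.inl h1
            · rcases Bool.eq_false_or_eq_true (ov.getD i false) with h2 | h2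
              · exact Or.inr h2
              · exact absurd (by rw [h1, h2]; rfl) hcond
          rcases hd with h | h
          · simp only [h, Bool.not_true, Bool.and_false, Bool.or_false]
          · simp only [h, Bool.true_or]
        · rw [hdec i hne]
      · rw [ihcnt, if_neg hcond]
        simp

theorem outer_spec (b : List Int) (n : Nat) (l : List Int)
    (hb : ∀ x ∈ l, x ∈ b)
    (hpre : ∀ i : Nat, n ≤ i → pvCond l b i = false) :
    (∀ x : Int, (l.foldl (AStep b) ([], List.replicate n false, 0)).1.contains x = decide (x ∈ l))
    ∧ ((l.foldl (AStep b) ([], List.replicate n false, 0)).2.1.length = n)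
    ∧ (∀ i : Nat, (l.foldl (AStep b) ([], List.replicate n false, 0)).2.1.getD i false = pvCond l b i)
    ∧ ((l.foldl (AStep b) ([], List.replicate n false, 0)).2.2
        = ((List.range b.length).countP (pvCond l b) : Int)) := by
  induction l using List.reverseRecOn with
  | nil =>
    refine ⟨by simp, by simp, ?_, ?_⟩
    · intro i
      simp [pvCond]
    · rw [List.countP_eq_zero.mpr (by intro i _; simp [pvCond])]
      simp
  | append_singleton l car ih =>
    have hb' : ∀ x ∈ l, x ∈ b := fun x hx => hb x (by simp [hx])
    have hmono : ∀ i : Nat, pvCond (l ++ [car]) b i = false → pvCond l b i = false := by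
      intro i h
      rw [pvCond_append] at h
      exact (Bool.or_eq_false_iff.mp h).1
    have hpre' : ∀ i : Nat, n ≤ i → pvCond l b i = false :=
      fun i hi => hmono i (hpre i hi)
    obtain ⟨ihg, ihlen, ihget, ihcnt⟩ := ih hb' hpre'
    rw [List.foldl_append, List.foldl_cons, List.foldl_nil]
    set st := l.foldl (AStep b) ([], List.replicate n false, 0) with hst
    have hcar_b : car ∈ b := hb car (by simp)
    obtain ⟨k, hk⟩ : ∃ k, PySem.List.index? b car = some k := by
      rcases h : PySem.List.index? b car with _ | k
      · rw [PySem.List.index?_eq_none_iff] at h; exact absurd hcar_b h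
      · exact ⟨k, rfl⟩
    have hpfb : pvFb b car = (k : Int) := by unfold pvFb; rw [hk]; rfl
    obtain ⟨hklt, -, -⟩ := PySem.List.getElem_of_index?_eq_some hk
    have hmemst : ∀ x : Int, x ∈ st.1 ↔ x ∈ l := by
      intro x
      have := ihg x
      rw [List.contains_eq_mem, decide_eq_decide] at this
      exact this
    have hAeq : AStep b st car =
        (if st.1.contains car then st.1 else st.1 ++ [car],
         ((List.range k).foldl (fun (s : List Bool × Int) i =>
            if !(if st.1.contains car then st.1 else st.1 ++ [car]).contains (b.getD i 0)
               && !(s.1.getD i false) then (s.1.set i true, s.2 + 1) else s)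
          (st.2.1, st.2.2)).1,
         ((List.range k).foldl (fun (s : List Bool × Int) i =>
            if !(if st.1.contains car then st.1 else st.1 ++ [car]).contains (b.getD i 0)
               && !(s.1.getD i false) then (s.1.set i true, s.2 + 1) else s)
          (st.2.1, st.2.2)).2) := by
      simp only [AStep, hk, Option.getD_some]
    have hg'c : ∀ x : Int,
        (if st.1.contains car then st.1 else st.1 ++ [car]).contains x = decide (x ∈ l ++ [car]) := by
      intro x
      by_cases hc : st.1.contains car
      · rw [if_pos hc]
        have hcl : car ∈ l := (hmemst car).mp (by
          rw [List.contains_eq_mem] at hc; simpa using hc)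
        rw [List.contains_eq_mem, decide_eq_decide, hmemst x]
        constructor
        · intro h; simp [h]
        · intro h
          rcases List.mem_append.mp h with h | h
          · exact h
          · simp at h; subst h; exact hcl
      · rw [if_neg hc]
        rw [List.contains_eq_mem, decide_eq_decide]
        constructor
        · intro h
          rcases List.mem_append.mp h with h | h
          · exact List.mem_append.mpr (Or.inl ((hmemst x).mp h))
          · exact List.mem_append.mpr (Or.inr h)
        · intro h
          rcases List.mem_append.mp h with h | h
          · exact List.mem_append.mpr (Or.inl ((hmemst x).mpr h))
          · exact List.mem_append.mpr (Or.inr h)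
    obtain ⟨hilen, higet, hicnt⟩ := inner_spec
      (if st.1.contains car then st.1 else st.1 ++ [car]) b k st.2.1 st.2.2
    have hflag2 : ∀ i : Nat,
        (st.2.1.getD i false || (decide (i < k) && decide (i < st.2.1.length)
            && !(if st.1.contains car then st.1 else st.1 ++ [car]).contains (b.getD i 0)))
          = pvCond (l ++ [car]) b i := by
      intro i
      rw [ihget i, ihlen, hg'c (b.getD i 0), pvCond_append]
      by_cases hi : i < n
      · simp only [hi, decide_true, Bool.and_true]
        congr 1
        rw [Bool.eq_iff_iff]
        simp only [Bool.and_eq_true, decide_eq_true_eq, Bool.not_eq_true',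
          decide_eq_false_iff_not]
        constructor
        · rintro ⟨h1, h2⟩
          exact ⟨by rw [hpfb]; exact_mod_cast h1, h2⟩
        · rintro ⟨h1, h2⟩
          rw [hpfb] at h1
          exact ⟨by exact_mod_cast h1, h2⟩
      · rw [← pvCond_append]
        rw [hpre i (by omega), hpre' i (by omega)]
        simp [hi]
    have hcnt2 : st.2.2 + (((List.range k).countP
          (fun i => !(if st.1.contains car then st.1 else st.1 ++ [car]).contains (b.getD i 0)
              && !(st.2.1.getD i false))) : Int)
        = ((List.range b.length).countP (pvCond (l ++ [car]) b) : Int) := by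
      rw [ihcnt]
      have hstep1 : (List.range b.length).countP (pvCond (l ++ [car]) b)
          = (List.range b.length).countP
              (fun i : Nat => pvCond l b i || decide ((i : Int) < pvFb b car ∧ b.getD i 0 ∉ l ++ [car])) := by
        apply List.countP_congr
        intro i _
        rw [pvCond_append]
      have hstep2 := countP_or (List.range b.length) (pvCond l b)
          (fun i : Nat => decide ((i : Int) < pvFb b car ∧ b.getD i 0 ∉ l ++ [car]))
      have hstep3 : (List.range b.length).countP
            (fun i : Nat => decide ((i : Int) < pvFb b car ∧ b.getD i 0 ∉ l ++ [car]) && !pvCond l b i)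
          = (List.range b.length).countP
            (fun i : Nat => decide (i < k) && (!decide (b.getD i 0 ∈ l ++ [car]) && !pvCond l b i)) := by
        apply List.countP_congr
        intro i _
        simp only [Bool.and_eq_true, decide_eq_true_eq, Bool.not_eq_true',
          decide_eq_false_iff_not, hpfb]
        constructor
        · rintro ⟨⟨h1, h2⟩, h3⟩
          exact ⟨by exact_mod_cast h1, h2, h3⟩
        · rintro ⟨h1, h2, h3⟩
          exact ⟨⟨by exact_mod_cast h1, h2⟩, h3⟩
      have hstep4 := countP_range_restrict b.length k (le_of_lt hklt)
          (fun i : Nat => !decide (b.getD i 0 ∈ l ++ [car]) && !pvCond l b i)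
      have hstep5 : (List.range k).countP
            (fun i : Nat => !decide (b.getD i 0 ∈ l ++ [car]) && !pvCond l b i)
          = (List.range k).countP
            (fun i : Nat => !(if st.1.contains car then st.1 else st.1 ++ [car]).contains (b.getD i 0)
                && !(st.2.1.getD i false)) := by
        apply List.countP_congr
        intro i _
        rw [hg'c (b.getD i 0), ihget i]
      rw [hstep1, hstep2, hstep3, hstep4, ← hstep5]
      push_cast
      ring
    refine ⟨?_, ?_, ?_, ?_⟩
    · intro x
      rw [hAeq]
      exact hg'c x
    · rw [hAeq]
      exact hilen.trans ihlen
    · intro i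
      rw [hAeq]
      exact (higet i).trans (hflag2 i)
    · rw [hAeq]
      exact hicnt.trans hcnt2


theorem solution_eq_count (a b : List Int) (h : Pre_solution a b) :
    solution a b = ((List.range b.length).countP (pvCond a b) : Int) := by
  have hpre : ∀ i : Nat, a.length ≤ i → pvCond a b i = false := by
    intro i hi
    by_cases hib : i < b.length
    · exact h.2 i (List.mem_range.mpr hib) hi
    · exact pvCond_false_of_ge a b i (by omega)
  rw [solution_eq_foldl]
  exact (outer_spec b a.length a h.1 hpre).2.2.2

theorem build_get? (l : List Int) (s : Int) (d : PySem.Dict Int Int) (x : Int) :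
    ((PySem.List.enumerate l s).foldl
      (fun (d : PySem.Dict Int Int) p => if d.contains p.2 then d else d.insert p.2 p.1) d).get? x
    = ((d.get? x).or ((PySem.List.index? l x).map (fun k => s + (k : Int)))) := by
  induction l generalizing s d with
  | nil =>
    rw [PySem.List.enumerate_nil]
    simp [PySem.List.index?]
  | cons y t ih =>
    rw [PySem.List.enumerate_cons, List.foldl_cons, ih]
    by_cases hxy : x = y
    · subst hxy
      rw [PySem.List.index?_cons_self]
      by_cases hc : d.contains x
      · rw [if_pos hc]
        rcases hg : d.get? x with _ | v
        · rw [PySem.Dict.contains_eq_isSome_get?, hg] at hc; simp at hc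
        · simp
      · rw [if_neg hc]
        have hg : d.get? x = none := by
          rcases hg : d.get? x with _ | v
          · rfl
          · rw [PySem.Dict.contains_eq_isSome_get?, hg] at hc; simp at hc
        rw [hg, PySem.Dict.get?_insert_self]
        simp
    · have hyx : y ≠ x := Ne.symm hxy
      rw [PySem.List.index?_cons_of_ne t hyx]
      have hd1 : (if d.contains y then d else d.insert y s).get? x = d.get? x := by
        by_cases hc : d.contains y
        · rw [if_pos hc]
        · rw [if_neg hc, PySem.Dict.get?_insert_of_ne d s hxy]
      rw [hd1]
      congr 1
      rcases ho : PySem.List.index? t x with _ | k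
      · simp
      · simp
        ring

def prefMaxList (f : Int → Int) (l : List Int) (m0 : Int) : List Int :=
  match l with
  | [] => []
  | x :: t => (max m0 (f x)) :: prefMaxList f t (max m0 (f x))

theorem scan_fold (f : Int → Int) (l : List Int) (acc : List Int) (m0 : Int) :
    l.foldl (fun (st : List Int × Int) x =>
        let m := max st.2 (f x)
        (st.1 ++ [m], m)) (acc, m0)
      = (acc ++ prefMaxList f l m0, l.foldl (fun m x => max m (f x)) m0) := by
  induction l generalizing acc m0 with
  | nil => simp [prefMaxList]
  | cons y t ih =>
    rw [List.foldl_cons, List.foldl_cons]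
    show t.foldl _ (acc ++ [max m0 (f y)], max m0 (f y)) = _
    rw [ih]
    simp [prefMaxList]

theorem prefMaxList_getD_gt (f : Int → Int) (l : List Int) (m0 : Int) (j : Nat)
    (hj : j < l.length) (i : Int) :
    (i < (prefMaxList f l m0).getD j 0) ↔ (i < m0 ∨ ∃ t ≤ j, i < f (l.getD t 0)) := by
  induction l generalizing m0 j with
  | nil => simp at hj
  | cons y t ih =>
    match j with
    | 0 =>
      simp only [prefMaxList, List.getD_cons_zero, lt_max_iff]
      constructor
      · rintro (h | h)
        · exact Or.inl h
        · exact Or.inr ⟨0, le_refl 0, h⟩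
      · rintro (h | ⟨t', ht', h⟩)
        · exact Or.inl h
        · interval_cases t'
          exact Or.inr h
    | j + 1 =>
      simp only [prefMaxList, List.getD_cons_succ]
      rw [ih (max m0 (f y)) j (by simp at hj; omega)]
      constructor
      · rintro (h | ⟨t', ht', h⟩)
        · rcases lt_max_iff.mp h with h | h
          · exact Or.inl h
          · exact Or.inr ⟨0, by omega, h⟩
        · exact Or.inr ⟨t' + 1, by omega, h⟩
      · rintro (h | ⟨t', ht', h⟩)
        · exact Or.inl (lt_max_iff.mpr (Or.inl h))
        · match t' with
          | 0 => exact Or.inl (lt_max_iff.mpr (Or.inr h))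
          | t' + 1 => exact Or.inr ⟨t', by omega, h⟩

theorem count_fold (fa : PySem.Dict Int Int) (pref : List Int) (n : Int)
    (l : List (Int × Int)) (c : Int) :
    l.foldl (fun (cnt : Int) p =>
        let k := PySem.Dict.getD fa p.2 n
        if p.1 < PySem.List.pyGetD pref k 0 then cnt + 1 else cnt) c
      = c + (l.countP (fun p =>
          decide (p.1 < PySem.List.pyGetD pref (PySem.Dict.getD fa p.2 n) 0)) : Int) := by
  induction l generalizing c with
  | nil => simp
  | cons p t ih =>
    rw [List.foldl_cons, List.countP_cons, ih]
    by_cases h : p.1 < PySem.List.pyGetD pref (PySem.Dict.getD fa p.2 n) 0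
    · rw [if_pos h, if_pos (by simpa using h)]
      push_cast
      ring
    · rw [if_neg h, if_neg (by simpa using h)]
      simp

theorem pvFa_nonneg (a : List Int) (x : Int) : 0 ≤ pvFa a x := by
  unfold pvFa
  rcases h : PySem.List.index? a x with _ | k <;> simp

theorem pvFa_le_len (a : List Int) (x : Int) : pvFa a x ≤ (a.length : Int) := by
  unfold pvFa
  rcases h : PySem.List.index? a x with _ | k
  · simp
  · obtain ⟨hk, -, -⟩ := PySem.List.getElem_of_index?_eq_some h
    simp
    omega


theorem pointwise_gt (a b : List Int) (j : Nat) :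
    ((j : Int) < PySem.List.pyGetD ((-1 : Int) :: prefMaxList (pvFb b) a (-1))
        (pvFa a (b.getD j 0)) 0)
      ↔ (∃ t < a.length, (j : Int) < pvFb b (a.getD t 0) ∧ (t : Int) < pvFa a (b.getD j 0)) := by
  set k := pvFa a (b.getD j 0) with hk
  have hk0 : 0 ≤ k := pvFa_nonneg _ _
  have hkn : k ≤ (a.length : Int) := pvFa_le_len _ _
  rw [PySem.List.pyGetD_of_nonneg _ _ hk0]
  cases hkt : k.toNat with
  | zero =>
    rw [List.getD_cons_zero]
    constructor
    · intro h; omega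
    · rintro ⟨t, ht, -, h2⟩; omega
  | succ kk =>
    rw [List.getD_cons_succ]
    have hkk : kk < a.length := by omega
    rw [prefMaxList_getD_gt (pvFb b) a (-1) kk hkk]
    constructor
    · rintro (h | ⟨t, ht, h⟩)
      · omega
      · exact ⟨t, by omega, h, by omega⟩
    · rintro ⟨t, ht, h1, h2⟩
      exact Or.inr ⟨t, by omega, h1⟩

theorem solution_alt_eq_count (a b : List Int) :
    solution_alt a b = ((List.range b.length).countP (pvCond a b) : Int) := by
  set faD := (PySem.List.enumerate a).foldl
      (fun (d : PySem.Dict Int Int) p => if d.contains p.2 then d else d.insert p.2 p.1)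
      PySem.Dict.empty with hfaD
  set fbD := (PySem.List.enumerate b).foldl
      (fun (d : PySem.Dict Int Int) p => if d.contains p.2 then d else d.insert p.2 p.1)
      PySem.Dict.empty with hfbD
  have hfa : ∀ x : Int, PySem.Dict.getD faD x (a.length : Int) = pvFa a x := by
    intro x
    rw [PySem.Dict.getD_eq_get?_getD, hfaD, build_get?]
    simp only [PySem.Dict.get?_empty, Option.none_or]
    unfold pvFa
    rcases h : PySem.List.index? a x with _ | k <;> simp
  have hfb : ∀ x : Int, PySem.Dict.getD fbD x (-1) = pvFb b x := by
    intro x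
    rw [PySem.Dict.getD_eq_get?_getD, hfbD, build_get?]
    simp only [PySem.Dict.get?_empty, Option.none_or]
    unfold pvFb
    rcases h : PySem.List.index? b x with _ | k <;> simp
  have hfbfun : (fun x => PySem.Dict.getD fbD x (-1)) = pvFb b := funext hfb
  have hpref : (a.foldl (fun (st : List Int × Int) x =>
      let m := max st.2 (PySem.Dict.getD fbD x (-1))
      (st.1 ++ [m], m)) ([(-1 : Int)], (-1 : Int))).1
      = (-1 : Int) :: prefMaxList (pvFb b) a (-1) := by
    rw [scan_fold (fun x => PySem.Dict.getD fbD x (-1)) a [(-1 : Int)] (-1), hfbfun]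
    rfl
  have e1 : solution_alt a b = (PySem.List.enumerate b).foldl (fun (cnt : Int) p =>
      let k := PySem.Dict.getD faD p.2 (a.length : Int)
      if p.1 < PySem.List.pyGetD ((a.foldl (fun (st : List Int × Int) x =>
          let m := max st.2 (PySem.Dict.getD fbD x (-1))
          (st.1 ++ [m], m)) ([(-1 : Int)], (-1 : Int))).1) k 0 then cnt + 1 else cnt) 0 := rfl
  rw [e1, count_fold, Int.zero_add]
  congr 1
  rw [PySem.List.enumerate_eq_map_pyRange b 0, List.countP_map]
  have hlen : PySem.List.len b = ((b.length : Nat) : Int) := rfl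
  rw [hlen, PySem.List.pyRange_zero_natCast, List.countP_map]
  apply List.countP_congr
  intro j hj
  simp only [Function.comp_apply, PySem.List.pyGetD_natCast, decide_eq_true_eq]
  rw [hfa, hpref]
  unfold pvCond
  rw [decide_eq_true_eq]
  exact pointwise_gt a b j

-- ===== VERDICT (by name: the statement is the Claim_ definition above) =====
theorem solution_spec : Claim_equal_solution := by
  intro a b _ h
  unfold Spec_solution
  rw [solution_eq_count a b h, solution_alt_eq_count]
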